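-- pv_equiv track=rewrite | github.com/JustasZaltauskas/dots-and-boxes-rl-bot | task_3_minimax_optimizations/DBNSymmetries.py | _untangle
-- ===== SOURCE A (Python) =====
-- def _untangle(sparsedMatrix):
--     # Untangles the sparsed matrix into lists consisting of the horizontal and vertical edges
--     hparts, vparts = [], []
--     for i, sublist in enumerate(sparsedMatrix):
--         if i % 2 == 0:
--             hparts.append(sublist)
--         else:
--             vparts.append(sublist)
--     return hparts, vparts
-- ===== SOURCE B (Python) =====
-- def _untangle(sparsedMatrix):
--     # Recursive pairwise decomposition: consume two rows at a time;
--     # the first of each pair is horizontal, the second vertical.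
--     if not sparsedMatrix:
--         return [], []
--     if len(sparsedMatrix) == 1:
--         return [sparsedMatrix[0]], []
--     h, v = _untangle(sparsedMatrix[2:])
--     return [sparsedMatrix[0]] + h, [sparsedMatrix[1]] + v
-- ===== Notes on version B (the rewrite author's own statement) =====
-- stated objective: alternative
-- what changed: Replaced the enumerate loop with a parity branch by a pairwise recursion that consumes two rows at a time, eliminating the index counter and the modulo test.
import Mathlib
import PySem

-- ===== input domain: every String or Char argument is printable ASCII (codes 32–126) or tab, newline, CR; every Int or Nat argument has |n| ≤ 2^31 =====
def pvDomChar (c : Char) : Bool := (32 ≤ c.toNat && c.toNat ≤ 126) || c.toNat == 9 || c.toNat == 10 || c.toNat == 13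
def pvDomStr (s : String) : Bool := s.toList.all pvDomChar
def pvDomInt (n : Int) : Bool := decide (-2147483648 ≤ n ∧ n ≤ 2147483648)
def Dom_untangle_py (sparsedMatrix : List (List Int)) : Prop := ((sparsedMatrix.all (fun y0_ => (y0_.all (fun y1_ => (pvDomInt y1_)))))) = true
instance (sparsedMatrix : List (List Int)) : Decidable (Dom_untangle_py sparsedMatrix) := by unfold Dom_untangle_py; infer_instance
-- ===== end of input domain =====

-- B replaces A's enumerate loop with a parity branch by a pairwise recursion consuming
-- two rows at a time (alternative decomposition; same cost).

-- ===== PORT A =====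
-- for i, sublist in enumerate(sparsedMatrix): if i % 2 == 0: hparts.append(sublist) else: vparts.append(sublist)
def untangle_py (sparsedMatrix : List (List Int)) : List (List Int) × List (List Int) :=
  (PySem.List.enumerate sparsedMatrix 0).foldl
    (fun hv p =>
      if PySem.Int.mod p.1 2 = 0 then (hv.1 ++ [p.2], hv.2) else (hv.1, hv.2 ++ [p.2]))
    ([], [])

-- ===== PORT B =====
-- pairwise recursion: the m[2:] slice on a two-element-headed list is the tail's tail
def untangle_py_alt : List (List Int) → List (List Int) × List (List Int)
  | [] => ([], [])
  | [x] => ([x], [])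
  | x :: y :: t =>
    let hv := untangle_py_alt t
    ([x] ++ hv.1, [y] ++ hv.2)

-- ===== PRECONDITION & SPEC =====
def Spec_untangle_py (sparsedMatrix : List (List Int)) (out : List (List Int) × List (List Int)) : Prop := out = untangle_py_alt sparsedMatrix
instance (sparsedMatrix : List (List Int)) (out : List (List Int) × List (List Int)) : Decidable (Spec_untangle_py sparsedMatrix out) := by unfold Spec_untangle_py; infer_instance

-- ===== CLAIM (what is proved, stated in full; the proofs are below) =====
def Claim_equal_untangle_py : Prop := ∀ (sparsedMatrix : List (List Int)), Dom_untangle_py sparsedMatrix → Spec_untangle_py sparsedMatrix (untangle_py sparsedMatrix)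

-- ===== LEMMAS AND PROOFS =====

lemma untangle_fold_pair (m : List (List Int)) :
    ∀ (s : Int) (h v : List (List Int)), PySem.Int.mod s 2 = 0 →
    (PySem.List.enumerate m s).foldl
      (fun hv p =>
        if PySem.Int.mod p.1 2 = 0 then (hv.1 ++ [p.2], hv.2) else (hv.1, hv.2 ++ [p.2]))
      (h, v)
    = (h ++ (untangle_py_alt m).1, v ++ (untangle_py_alt m).2) := by
  induction m using untangle_py_alt.induct with
  | case1 =>
    intro s h v _
    simp [PySem.List.enumerate, untangle_py_alt]
  | case2 x =>
    intro s h v hs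
    have hdvd : (2:Int) ∣ s := by
      rw [PySem.Int.mod_eq_emod_of_pos (by omega)] at hs; omega
    simp [PySem.List.enumerate_cons, PySem.List.enumerate_nil, untangle_py_alt, hdvd]
  | case3 x y t ih =>
    intro s h v hs
    have hs1 : PySem.Int.mod (s + 1) 2 = 1 := by
      rw [PySem.Int.mod_eq_emod_of_pos (by omega)] at *
      omega
    have hs2 : PySem.Int.mod (s + 1 + 1) 2 = 0 := by
      rw [PySem.Int.mod_eq_emod_of_pos (by omega)] at *
      omega
    simp only [PySem.List.enumerate_cons, List.foldl_cons, hs, hs1, if_pos,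
      one_ne_zero, reduceIte]
    rw [ih (s + 1 + 1) (h ++ [x]) (v ++ [y]) hs2]
    simp [untangle_py_alt]

-- ===== VERDICT (by name: the statement is the Claim_ definition above) =====
theorem untangle_py_spec : Claim_equal_untangle_py := by
  intro m _
  unfold Spec_untangle_py untangle_py
  simpa using untangle_fold_pair m 0 [] [] (by decide)
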